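-- pv_equiv track=rewrite | github.com/souviksenapati/TejastraX | app/services/advanced_chunking.py | recursive_text_splitter
-- ===== SOURCE A (Python) =====
-- from typing import List, Dict, Tuple
--
-- def recursive_text_splitter(text: str, max_tokens: int = 400, overlap_tokens: int = 50) -> List[str]:
--     """Recursively split text using multiple separators"""
--
--     max_chars = max_tokens * 4
--     overlap_chars = overlap_tokens * 4
--
--     if len(text) <= max_chars:
--         return [text]
--
--     # Hierarchical separators (order matters)
--     separators = [
--         '\n\n\n',  # Multiple newlines
--         '\n\n',    # Double newlines (paragraphs)
--         '\n',      # Single newlines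
--         '. ',      # Sentences
--         ', ',      # Clauses
--         ' '        # Words
--     ]
--
--     chunks = []
--
--     def split_by_separator(text: str, separator: str) -> List[str]:
--         if separator not in text:
--             return [text]
--
--         parts = text.split(separator)
--         result = []
--         current_chunk = ""
--
--         for i, part in enumerate(parts):
--             test_chunk = current_chunk + separator + part if current_chunk else part
--
--             if len(test_chunk) <= max_chars:
--                 current_chunk = test_chunk
--             else:
--                 if current_chunk:
--                     result.append(current_chunk)
--                     # Add overlap from previous chunk
--                     overlap_text = current_chunk[-overlap_chars:] if len(current_chunk) > overlap_chars else current_chunk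
--                     current_chunk = overlap_text + separator + part if overlap_text else part
--                 else:
--                     current_chunk = part
--
--         if current_chunk:
--             result.append(current_chunk)
--
--         return result
--
--     # Try each separator recursively
--     def recursive_split(text: str, sep_index: int = 0) -> List[str]:
--         if sep_index >= len(separators) or len(text) <= max_chars:
--             return [text]
--
--         separator = separators[sep_index]
--         parts = split_by_separator(text, separator)
--
--         result = []
--         for part in parts:
--             if len(part) > max_chars:
--                 # Recursively split with next separator
--                 result.extend(recursive_split(part, sep_index + 1))
--             else:
--                 result.append(part)
--
--         return result
--
--     return recursive_split(text)
-- ===== SOURCE B (Python) =====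
-- from typing import List
--
-- # Same task, different decomposition: instead of recursing per oversized segment,
-- # apply the separators as successive flattening passes over a flat list of segments.
--
-- _SEPARATORS = ['\n\n\n', '\n\n', '\n', '. ', ', ', ' ']
--
--
-- def _split_by_separator(text: str, separator: str, max_chars: int, overlap_chars: int) -> List[str]:
--     if separator not in text:
--         return [text]
--     parts = text.split(separator)
--     result = []
--     current_chunk = ""
--     for part in parts:
--         test_chunk = current_chunk + separator + part if current_chunk else part
--         if len(test_chunk) <= max_chars:
--             current_chunk = test_chunk
--         else:
--             if current_chunk:
--                 result.append(current_chunk)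
--                 overlap_text = current_chunk[-overlap_chars:] if len(current_chunk) > overlap_chars else current_chunk
--                 current_chunk = overlap_text + separator + part if overlap_text else part
--             else:
--                 current_chunk = part
--     if current_chunk:
--         result.append(current_chunk)
--     return result
--
--
-- def recursive_text_splitter(text: str, max_tokens: int = 400, overlap_tokens: int = 50) -> List[str]:
--     max_chars = max_tokens * 4
--     overlap_chars = overlap_tokens * 4
--     if len(text) <= max_chars:
--         return [text]
--     segments = [text]
--     for sep in _SEPARATORS:
--         new_segments = []
--         for seg in segments:
--             if len(seg) <= max_chars:
--                 new_segments.append(seg)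
--             else:
--                 new_segments.extend(_split_by_separator(seg, sep, max_chars, overlap_chars))
--         segments = new_segments
--     return segments
-- ===== Notes on version B (the rewrite author's own statement) =====
-- stated objective: alternative
-- what changed: Replaces the per-segment recursion over separator indices by an iterative driver that applies each separator in turn as a flattening pass over the whole flat list of segments (level-order instead of recursive pre-order), keeping the greedy split_by_separator helper.
import Mathlib
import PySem

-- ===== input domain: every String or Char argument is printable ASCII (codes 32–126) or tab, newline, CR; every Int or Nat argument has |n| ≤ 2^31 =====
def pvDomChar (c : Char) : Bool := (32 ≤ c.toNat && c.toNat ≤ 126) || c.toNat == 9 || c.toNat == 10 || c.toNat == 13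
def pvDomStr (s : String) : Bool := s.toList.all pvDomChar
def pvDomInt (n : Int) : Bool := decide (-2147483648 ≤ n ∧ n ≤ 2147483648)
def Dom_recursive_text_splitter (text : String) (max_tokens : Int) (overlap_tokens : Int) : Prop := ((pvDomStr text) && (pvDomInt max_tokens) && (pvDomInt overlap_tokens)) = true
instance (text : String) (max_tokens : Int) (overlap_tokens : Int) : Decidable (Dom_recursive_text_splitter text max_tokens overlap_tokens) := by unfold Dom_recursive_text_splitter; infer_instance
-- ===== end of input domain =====

-- B re-expresses A's per-segment recursion as successive flattening passes over the
-- separator list (same cost; objective: alternative decomposition).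


-- ===== PORT A =====

-- the hierarchical separator list (shared constant)
def pvSeps : List (List Char) :=
  [['\n', '\n', '\n'], ['\n', '\n'], ['\n'], ['.', ' '], [',', ' '], [' ']]

-- greedy split_by_separator (identical helper in A and in B; ported once, over List Char)
def pvSplitBySep (mc oc : Int) (t sep : List Char) : List (List Char) :=
  if ¬ PySem.Chars.isIn sep t then [t]
  else
    let parts := PySem.Chars.splitOn t sep
    let st := parts.foldl (fun (st : List (List Char) × List Char) part =>
      let result := st.1
      let cur := st.2
      let test := if cur ≠ [] then cur ++ sep ++ part else part
      if (test.length : Int) ≤ mc then (result, test)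
      else if cur ≠ [] then
        let overlap := if (cur.length : Int) > oc then PySem.List.slice cur (some (-oc)) none else cur
        (result ++ [cur], if overlap ≠ [] then overlap ++ sep ++ part else part)
      else (result, part)) ([], [])
    if st.2 ≠ [] then st.1 ++ [st.2] else st.1

mutual
  -- A's recursive_split(text, sep_index): the suffix of the separator list plays sep_index
  def pvRecSplit (mc oc : Int) : List (List Char) → List Char → List (List Char)
    | [], t => [t]
    | sep :: rest, t =>
      if (t.length : Int) ≤ mc then [t]
      else pvRecLoop mc oc rest (pvSplitBySep mc oc t sep) []
  termination_by seps _ => (seps.length, 0)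
  decreasing_by all_goals simp_wf; omega

  -- A's 'for part in parts' accumulator loop
  def pvRecLoop (mc oc : Int) (rest : List (List Char)) : List (List Char) → List (List Char) → List (List Char)
    | [], res => res
    | p :: ps, res =>
      pvRecLoop mc oc rest ps
        (if (p.length : Int) > mc then res ++ pvRecSplit mc oc rest p else res ++ [p])
  termination_by parts _ => (rest.length, parts.length + 1)
  decreasing_by all_goals simp_wf; omega
end

def recursive_text_splitter (text : String) (max_tokens : Int) (overlap_tokens : Int) : List String :=
  let mc := max_tokens * 4
  let oc := overlap_tokens * 4
  if (text.toList.length : Int) ≤ mc then [text]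
  else (pvRecSplit mc oc pvSeps text.toList).map String.ofList

-- ===== PORT B =====

-- one pass of B's outer loop: re-split every still-oversized segment by this separator
def pvPass (mc oc : Int) (segs : List (List Char)) (sep : List Char) : List (List Char) :=
  segs.foldl (fun acc seg =>
    acc ++ (if (seg.length : Int) ≤ mc then [seg] else pvSplitBySep mc oc seg sep)) []

def recursive_text_splitter_alt (text : String) (max_tokens : Int) (overlap_tokens : Int) : List String :=
  let mc := max_tokens * 4
  let oc := overlap_tokens * 4
  if (text.toList.length : Int) ≤ mc then [text]
  else (pvSeps.foldl (pvPass mc oc) [text.toList]).map String.ofList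

-- ===== PRECONDITION & SPEC =====
def Spec_recursive_text_splitter (text : String) (max_tokens : Int) (overlap_tokens : Int) (out : List String) : Prop := out = recursive_text_splitter_alt text max_tokens overlap_tokens
instance (text : String) (max_tokens : Int) (overlap_tokens : Int) (out : List String) : Decidable (Spec_recursive_text_splitter text max_tokens overlap_tokens out) := by unfold Spec_recursive_text_splitter; infer_instance

-- ===== CLAIM (what is proved, stated in full; the proofs are below) =====
def Claim_equal_recursive_text_splitter : Prop := ∀ (text : String) (max_tokens : Int) (overlap_tokens : Int), Dom_recursive_text_splitter text max_tokens overlap_tokens → Spec_recursive_text_splitter text max_tokens overlap_tokens (recursive_text_splitter text max_tokens overlap_tokens)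

-- ===== LEMMAS AND PROOFS =====

-- one B-pass is a flatMap of the per-segment expansion
theorem pvPass_eq_flatMap (mc oc : Int) (segs : List (List Char)) (sep : List Char) :
    pvPass mc oc segs sep
      = segs.flatMap (fun seg => if (seg.length : Int) ≤ mc then [seg] else pvSplitBySep mc oc seg sep) := by
  simpa [pvPass] using
    PySem.List.foldl_append_eq_flatMap
      (fun seg => if (seg.length : Int) ≤ mc then [seg] else pvSplitBySep mc oc seg sep) segs []

-- a small segment survives every remaining pass unchanged
theorem pvFold_small (mc oc : Int) (seps : List (List Char)) (t : List Char)
    (h : (t.length : Int) ≤ mc) : seps.foldl (pvPass mc oc) [t] = [t] := by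
  induction seps with
  | nil => rfl
  | cons s r ih =>
    have hh : pvPass mc oc [t] s = [t] := by simp [pvPass_eq_flatMap, h]
    simpa [List.foldl_cons, hh] using ih

-- B's fold distributes over the segment list
theorem pvFold_flatMap (mc oc : Int) (seps : List (List Char)) (xs : List (List Char)) :
    seps.foldl (pvPass mc oc) xs = xs.flatMap (fun x => seps.foldl (pvPass mc oc) [x]) := by
  induction seps generalizing xs with
  | nil => simp
  | cons s r ih =>
    calc (s :: r).foldl (pvPass mc oc) xs
        = r.foldl (pvPass mc oc) (pvPass mc oc xs s) := by simp [List.foldl_cons]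
      _ = (pvPass mc oc xs s).flatMap (fun y => r.foldl (pvPass mc oc) [y]) := ih _
      _ = xs.flatMap (fun x =>
            ((if (x.length : Int) ≤ mc then [x] else pvSplitBySep mc oc x s).flatMap
              (fun y => r.foldl (pvPass mc oc) [y]))) := by
            rw [pvPass_eq_flatMap]; simp [List.flatMap_assoc]
      _ = xs.flatMap (fun x => (s :: r).foldl (pvPass mc oc) [x]) := by
            apply List.flatMap_congr
            intro x _
            rw [← ih]
            simp [List.foldl_cons, pvPass_eq_flatMap]

-- A's inner loop is an accumulator-free flatMap
theorem pvRecLoop_eq (mc oc : Int) (rest : List (List Char)) (parts res : List (List Char)) :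
    pvRecLoop mc oc rest parts res
      = res ++ parts.flatMap (fun p => if (p.length : Int) > mc then pvRecSplit mc oc rest p else [p]) := by
  induction parts generalizing res with
  | nil => simp [pvRecLoop]
  | cons p ps ih =>
    rw [pvRecLoop, ih]
    by_cases h : (p.length : Int) > mc <;> simp [h]

-- a small segment is returned as-is by A's recursion, whatever separators remain
theorem pvRecSplit_small (mc oc : Int) (seps : List (List Char)) (t : List Char)
    (h : (t.length : Int) ≤ mc) : pvRecSplit mc oc seps t = [t] := by
  cases seps with
  | nil => simp [pvRecSplit]
  | cons s r => simp [pvRecSplit, h]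

-- main bridge: A's recursion over a separator suffix equals B's fold over that suffix
theorem pvRecSplit_eq_fold (mc oc : Int) (seps : List (List Char)) (t : List Char) :
    pvRecSplit mc oc seps t = seps.foldl (pvPass mc oc) [t] := by
  induction seps generalizing t with
  | nil => simp [pvRecSplit]
  | cons s r ih =>
    by_cases h : (t.length : Int) ≤ mc
    · rw [pvRecSplit_small mc oc _ t h, pvFold_small mc oc _ t h]
    · rw [pvRecSplit, if_neg h, pvRecLoop_eq, List.nil_append]
      have h1 : pvPass mc oc [t] s = pvSplitBySep mc oc t s := by
        simp [pvPass_eq_flatMap, h]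
      rw [List.foldl_cons, h1, pvFold_flatMap]
      apply List.flatMap_congr
      intro p _
      by_cases hp : (p.length : Int) > mc
      · rw [if_pos hp, ih]
      · rw [if_neg hp, pvFold_small mc oc r p (by omega)]

-- ===== VERDICT (by name: the statement is the Claim_ definition above) =====
theorem recursive_text_splitter_spec : Claim_equal_recursive_text_splitter := by
  intro text mt ot _
  unfold Spec_recursive_text_splitter recursive_text_splitter recursive_text_splitter_alt
  simp only [pvRecSplit_eq_fold]
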